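-- pv_equiv track=rewrite | github.com/shrey715/flying-fish | backend/agents/speculation_agent.py | _parse_speculation
-- ===== SOURCE A (Python) =====
-- def _parse_speculation(text: str) -> list:
--     """Parse speculation text into structured items"""
--     # Basic parsing - extract numbered items
--     items = []
--     lines = text.split('\n')
--
--     current_item = None
--     for line in lines:
--         line = line.strip()
--         if line.startswith(('1.', '2.', '3.')):
--             if current_item:
--                 items.append(current_item)
--             current_item = {'text': line, 'type': 'speculation'}
--         elif current_item and line:
--             current_item['text'] += ' ' + line
--
--     if current_item:
--         items.append(current_item)
--
--     return items if items else [{'text': text, 'type': 'speculation'}]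
-- ===== SOURCE B (Python) =====
-- def _is_header(line):
--     return line.startswith(('1.', '2.', '3.'))
--
--
-- def _segments(lines):
--     """Split stripped lines into one joined text per numbered header."""
--     if not lines:
--         return []
--     head, rest = lines[0], lines[1:]
--     if not _is_header(head):
--         return _segments(rest)
--     n = 0
--     while n < len(rest) and not _is_header(rest[n]):
--         n += 1
--     body = [ln for ln in rest[:n] if ln]
--     return [' '.join([head] + body)] + _segments(rest[n:])
--
--
-- def _parse_speculation(text: str) -> list:
--     lines = [ln.strip() for ln in text.split('\n')]
--     items = [{'text': t, 'type': 'speculation'} for t in _segments(lines)]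
--     return items if items else [{'text': text, 'type': 'speculation'}]
-- ===== Notes on version B (the rewrite author's own statement) =====
-- stated objective: alternative
-- what changed: Replaces A's single stateful pass with a mutable current_item dict by a segment-splitting recursion: skip to each numbered header, count its continuation block, join it into one text at once, and recurse on the rest.
import Mathlib
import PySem

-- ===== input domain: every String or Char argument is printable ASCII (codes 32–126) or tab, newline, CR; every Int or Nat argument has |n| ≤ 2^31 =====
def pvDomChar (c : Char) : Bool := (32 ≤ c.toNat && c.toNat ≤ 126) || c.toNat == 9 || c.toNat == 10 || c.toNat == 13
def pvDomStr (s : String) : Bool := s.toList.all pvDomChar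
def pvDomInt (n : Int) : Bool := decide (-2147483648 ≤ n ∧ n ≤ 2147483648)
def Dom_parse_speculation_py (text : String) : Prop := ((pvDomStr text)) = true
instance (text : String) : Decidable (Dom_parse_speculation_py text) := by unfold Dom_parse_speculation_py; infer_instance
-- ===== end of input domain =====

-- B replaces A's single stateful pass (mutable current_item) by a segment-splitting recursion
-- (skip to each numbered header, take its continuation block, join once); objective: alternative decomposition, same cost.

-- ===== PORT A =====
-- A's loop state: (items so far, current_item); the dict {'text':…,'type':…} is the association
-- list [("text",…),("type",…)]; current_item['text'] += … updates the value of the unique key "text".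
def pvStepA (st : List (List (String × String)) × Option (List (String × String)))
    (line0 : String) : List (List (String × String)) × Option (List (String × String)) :=
  let line := PySem.Str.strip line0
  if PySem.Str.startswith line "1." || PySem.Str.startswith line "2." || PySem.Str.startswith line "3." then
    ((match st.2 with | some c => st.1 ++ [c] | none => st.1),
     some [("text", line), ("type", "speculation")])
  else
    match st.2 with
    | some c =>
        if line ≠ "" then
          (st.1, some (c.map (fun p => if p.1 = "text" then (p.1, p.2 ++ " " ++ line) else p)))
        else st
    | none => st

def parse_speculation_py (text : String) : List (List (String × String)) :=
  let lines := (PySem.Str.split? text "\n").getD []   -- sep "\n" ≠ "" so split? is always some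
  let st := lines.foldl pvStepA ([], none)
  let items := match st.2 with | some c => st.1 ++ [c] | none => st.1
  if items = [] then [[("text", text), ("type", "speculation")]] else items

-- ===== PORT B =====
def pvIsHeader (line : String) : Bool :=
  PySem.Str.startswith line "1." || PySem.Str.startswith line "2." || PySem.Str.startswith line "3."

-- the 'while n < len(rest) and not _is_header(rest[n]): n += 1' counter of Source B
def pvSegLen (rest : List String) : Nat :=
  match rest with
  | [] => 0
  | l :: t => if pvIsHeader l then 0 else pvSegLen t + 1

def pvSegments (lines : List String) : List String :=
  match lines with
  | [] => []
  | head :: rest =>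
      if pvIsHeader head then
        let n := pvSegLen rest
        let body := (rest.take n).filter (fun l => l ≠ "")
        PySem.Str.join " " (head :: body) :: pvSegments (rest.drop n)
      else pvSegments rest
termination_by lines.length
decreasing_by
  · simp
  · simp

def parse_speculation_py_alt (text : String) : List (List (String × String)) :=
  let lines := (((PySem.Str.split? text "\n").getD []).map PySem.Str.strip)
  let items := (pvSegments lines).map (fun t => [(("text" : String), t), (("type" : String), "speculation")])
  if items = [] then [[("text", text), ("type", "speculation")]] else items

-- ===== PRECONDITION & SPEC =====
def Spec_parse_speculation_py (text : String) (out : List (List (String × String))) : Prop := out = parse_speculation_py_alt text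
instance (text : String) (out : List (List (String × String))) : Decidable (Spec_parse_speculation_py text out) := by unfold Spec_parse_speculation_py; infer_instance

-- ===== CLAIM (what is proved, stated in full; the proofs are below) =====
def Claim_equal_parse_speculation_py : Prop := ∀ (text : String), Dom_parse_speculation_py text → Spec_parse_speculation_py text (parse_speculation_py text)

-- ===== LEMMAS AND PROOFS =====

def pvMk (t : String) : List (String × String) := [("text", t), ("type", "speculation")]

def pvFlush (st : List (List (String × String)) × Option (List (String × String))) :
    List (List (String × String)) :=
  match st.2 with | some c => st.1 ++ [c] | none => st.1

lemma pv_join_shift (h x : String) (xs : List String) :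
    PySem.Str.join " " (h :: x :: xs) = PySem.Str.join " " ((h ++ " " ++ x) :: xs) := by
  apply String.toList_injective
  cases xs with
  | nil => simp [PySem.Str.toList_join, PySem.Chars.join_cons_cons, PySem.Chars.join_singleton]
  | cons y ys => simp [PySem.Str.toList_join, PySem.Chars.join_cons_cons]

lemma pv_join_cons_eq_foldl (h : String) (xs : List String) :
    PySem.Str.join " " (h :: xs) = xs.foldl (fun a l => a ++ " " ++ l) h := by
  induction xs generalizing h with
  | nil => apply String.toList_injective; simp [PySem.Str.toList_join, PySem.Chars.join_singleton]
  | cons x xs ih => rw [pv_join_shift, ih, List.foldl_cons]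

lemma pv_hdr_empty : pvIsHeader "" = false := by decide

lemma pv_some_case (ls : List String) (items : List (List (String × String))) (t : String) :
    pvFlush (ls.foldl pvStepA (items, some (pvMk t))) =
      items ++ pvMk ((((ls.map PySem.Str.strip).take (pvSegLen (ls.map PySem.Str.strip))).filter
            (fun l => l ≠ "")).foldl (fun a l => a ++ " " ++ l) t)
        :: (pvSegments ((ls.map PySem.Str.strip).drop (pvSegLen (ls.map PySem.Str.strip)))).map pvMk := by
  induction ls generalizing items t with
  | nil => simp [pvFlush, pvSegments]
  | cons l ls ih =>
      rw [List.foldl_cons]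
      by_cases hh : pvIsHeader (PySem.Str.strip l) = true
      · have hstep : pvStepA (items, some (pvMk t)) l = (items ++ [pvMk t], some (pvMk (PySem.Str.strip l))) := by
          simp only [pvStepA, pvIsHeader] at hh ⊢
          rw [if_pos hh]
          simp [pvMk]
        rw [hstep, ih]
        simp only [List.map_cons, pvSegLen, hh, if_pos, List.take_zero, List.drop_zero]
        rw [pvSegments, if_pos hh]
        simp [pv_join_cons_eq_foldl, List.append_assoc]
      · by_cases he : PySem.Str.strip l = ""
        · have hstep : pvStepA (items, some (pvMk t)) l = (items, some (pvMk t)) := by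
            simp only [pvStepA, pvIsHeader] at hh ⊢
            rw [if_neg hh]
            simp [he]
          rw [hstep, ih]
          simp [pvSegLen, he, pv_hdr_empty]
        · have hstep : pvStepA (items, some (pvMk t)) l = (items, some (pvMk (t ++ " " ++ PySem.Str.strip l))) := by
            simp only [pvStepA, pvIsHeader] at hh ⊢
            rw [if_neg hh]
            simp only [pvMk] at *
            simp [he]
          rw [hstep, ih]
          simp [pvSegLen, hh, he]

lemma pv_none_case (ls : List String) (items : List (List (String × String))) :
    pvFlush (ls.foldl pvStepA (items, none)) =
      items ++ (pvSegments (ls.map PySem.Str.strip)).map pvMk := by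
  induction ls generalizing items with
  | nil => simp [pvFlush, pvSegments]
  | cons l ls ih =>
      rw [List.foldl_cons]
      by_cases hh : pvIsHeader (PySem.Str.strip l) = true
      · have hstep : pvStepA (items, none) l = (items, some (pvMk (PySem.Str.strip l))) := by
          simp only [pvStepA, pvIsHeader] at hh ⊢
          rw [if_pos hh]
          simp [pvMk]
        rw [hstep, pv_some_case]
        simp only [List.map_cons]
        rw [pvSegments, if_pos hh]
        simp [pv_join_cons_eq_foldl]
      · have hstep : pvStepA (items, none) l = (items, none) := by
          simp only [pvStepA, pvIsHeader] at hh ⊢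
          rw [if_neg hh]
        rw [hstep, ih]
        simp only [List.map_cons]
        rw [pvSegments, if_neg hh]

-- ===== VERDICT (by name: the statement is the Claim_ definition above) =====
theorem parse_speculation_py_spec : Claim_equal_parse_speculation_py := by
  intro text _
  unfold Spec_parse_speculation_py parse_speculation_py parse_speculation_py_alt
  have h := pv_none_case ((PySem.Str.split? text "\n").getD []) []
  simp only [pvFlush] at h
  simp only [List.nil_append] at h
  simp only [h]
  rfl
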